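-- pv_equiv track=rewrite | github.com/nrw24/CS100 | CS Program Test.py | aSym
-- ===== SOURCE A (Python) =====
-- def aSym(aString):
--  words = aString.split()
--  left = 0
--  right = -1
--  for word in words:
--      if words[left] != words[right]:
--          return word
--      left += 1
--      right -= 1
--  return ""
-- ===== SOURCE B (Python) =====
-- def aSym(aString):
--     def check(words):
--         if len(words) < 2:
--             return ""
--         if words[0] != words[-1]:
--             return words[0]
--         return check(words[1:-1])
--     return check(aString.split())
-- ===== Notes on version B (the rewrite author's own statement) =====
-- stated objective: simpler
-- what changed: Replaces the index-pointer loop over all words (which re-checks every mirrored pair twice) with a recursive helper that compares the two end words and recurses on the inner slice, stopping at the middle.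
import Mathlib
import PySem

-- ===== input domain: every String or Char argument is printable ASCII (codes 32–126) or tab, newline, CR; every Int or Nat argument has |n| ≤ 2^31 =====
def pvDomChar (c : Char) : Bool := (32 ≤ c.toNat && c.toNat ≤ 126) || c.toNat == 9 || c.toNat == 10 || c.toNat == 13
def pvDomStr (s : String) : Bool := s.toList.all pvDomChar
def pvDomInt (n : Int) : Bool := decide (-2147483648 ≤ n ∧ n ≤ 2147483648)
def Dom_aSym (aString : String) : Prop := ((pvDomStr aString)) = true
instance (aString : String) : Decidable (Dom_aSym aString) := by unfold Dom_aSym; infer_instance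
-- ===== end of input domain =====

-- B replaces A's index-pointer loop over all words (each mirrored pair compared twice)
-- with a recursion that compares the two end words and recurses on the inner slice (objective: simpler).


-- ===== PORT A =====
-- the 'for word in words' loop carrying the two index pointers left/right over the full word list
def aSymLoopA (words : List String) : List String → Int → Int → String
  | [], _, _ => ""
  | w :: rest, l, r =>
    if PySem.List.pyGet? words l ≠ PySem.List.pyGet? words r then w
    else aSymLoopA words rest (l + 1) (r - 1)

def aSym (aString : String) : String :=
  aSymLoopA (PySem.Str.split₀ aString) (PySem.Str.split₀ aString) 0 (-1)

-- ===== PORT B =====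
-- check(words): "" if fewer than 2 words; words[0] on end mismatch; else recurse on words[1:-1]
def aSymCheck : List String → String
  | [] => ""
  | [_] => ""
  | w :: x :: rest =>
    if (x :: rest).getLast? ≠ some w then w
    else aSymCheck (x :: rest).dropLast
termination_by ws => ws.length
decreasing_by simp

def aSym_alt (aString : String) : String :=
  aSymCheck (PySem.Str.split₀ aString)

-- ===== PRECONDITION & SPEC =====
def Spec_aSym (aString : String) (out : String) : Prop := out = aSym_alt aString
instance (aString : String) (out : String) : Decidable (Spec_aSym aString out) := by unfold Spec_aSym; infer_instance

-- ===== CLAIM (what is proved, stated in full; the proofs are below) =====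
def Claim_equal_aSym : Prop := ∀ (aString : String), Dom_aSym aString → Spec_aSym aString (aSym aString)

-- ===== LEMMAS AND PROOFS =====

-- index facts on the padded list a :: (m ++ [a]) and on m itself
lemma getPos (a x : String) (m : List String) (j : Nat) (hx : m[j]? = some x) :
    PySem.List.pyGet? (a :: (m ++ [a])) ((j : Int) + 1) = some x := by
  rw [PySem.List.pyGet?_cons_succ, PySem.List.pyGet?_natCast,
    List.getElem?_append_left (List.getElem?_eq_some_iff.mp hx).1]
  exact hx

lemma getNeg (a : String) (m : List String) (j : Nat) (hj : j < m.length) :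
    PySem.List.pyGet? (a :: (m ++ [a])) (-((j : Int) + 2)) = m[m.length - j - 1]? := by
  have h : -((j : Int) + 2) = -((j + 2 : Nat) : Int) := by push_cast; ring
  rw [h, PySem.List.pyGet?_neg_natCast _ _ (by omega) (by simp; omega)]
  have h2 : (a :: (m ++ [a])).length - (j + 2) = (m.length - j - 1) + 1 := by simp; omega
  rw [h2, List.getElem?_cons_succ, List.getElem?_append_left (by omega)]

lemma getNegM (m : List String) (j : Nat) (hj : j < m.length) :
    PySem.List.pyGet? m (-((j : Int) + 1)) = m[m.length - j - 1]? := by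
  have h : -((j : Int) + 1) = -((j + 1 : Nat) : Int) := by push_cast; ring
  rw [h, PySem.List.pyGet?_neg_natCast _ _ (by omega) (by omega), Nat.sub_sub]

lemma getLastPos (a : String) (m : List String) :
    PySem.List.pyGet? (a :: (m ++ [a])) ((m.length : Int) + 1) = some a := by
  rw [PySem.List.pyGet?_cons_succ, PySem.List.pyGet?_natCast]
  simp

lemma getFirstNeg (a : String) (m : List String) :
    PySem.List.pyGet? (a :: (m ++ [a])) (-((m.length : Int) + 2)) = some a := by
  have h : -((m.length : Int) + 2) = -((m.length + 2 : Nat) : Int) := by push_cast; ring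
  rw [h, PySem.List.pyGet?_neg_natCast _ _ (by omega) (by simp)]
  simp

-- A's loop on a list with equal end words behaves, over the inner part, like the loop started afresh on the inner list
lemma loopA_inner (a : String) :
    ∀ (s m : List String) (j : Nat), j ≤ m.length → m.drop j = s →
      aSymLoopA (a :: (m ++ [a])) (s ++ [a]) ((j : Int) + 1) (-((j : Int) + 2)) =
      aSymLoopA m s (j : Int) (-((j : Int) + 1)) := by
  intro s
  induction s with
  | nil =>
    intro m j hj hd
    have hjm : j = m.length := by
      have := List.drop_eq_nil_iff.mp hd; omega
    subst hjm
    simp only [List.nil_append, aSymLoopA, getLastPos, getFirstNeg]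
    simp
  | cons x s' ih =>
    intro m j hj hd
    have hjlt : j < m.length := by
      by_contra h
      rw [List.drop_eq_nil_iff.mpr (by omega)] at hd
      simp at hd
    have hx : m[j]? = some x := by
      have h : (m.drop j)[0]? = m[j + 0]? := List.getElem?_drop
      rw [hd] at h; simpa using h.symm
    have hd' : m.drop (j + 1) = s' := by
      rw [← List.drop_drop, hd]; rfl
    show aSymLoopA _ (x :: (s' ++ [a])) _ _ = aSymLoopA m (x :: s') _ _
    rw [aSymLoopA, aSymLoopA, getPos a x m j hx, getNeg a m j hjlt,
      PySem.List.pyGet?_natCast, hx, getNegM m j hjlt]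
    split
    · rfl
    · have e1 : (j : Int) + 1 + 1 = ((j + 1 : Nat) : Int) + 1 := by push_cast; ring
      have e2 : -((j : Int) + 2) - 1 = -(((j + 1 : Nat) : Int) + 2) := by push_cast; ring
      have e4 : -((j : Int) + 1) - 1 = -(((j + 1 : Nat) : Int) + 1) := by push_cast; ring
      have e3 : (j : Int) + 1 = ((j + 1 : Nat) : Int) := by push_cast; ring
      rw [e1, e2, e4, e3]
      exact ih m (j + 1) (by omega) hd'

-- A's full loop equals B's recursion, on any word list
lemma key : ∀ (ws : List String), aSymLoopA ws ws 0 (-1) = aSymCheck ws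
  | [] => by simp [aSymLoopA, aSymCheck]
  | [x] => by
    rw [aSymLoopA, PySem.List.pyGet?_zero_cons, PySem.List.pyGet?_neg_one]
    simp [aSymLoopA, aSymCheck]
  | a :: x :: t => by
    have hne : (x :: t) ≠ ([] : List String) := by simp
    set b := (x :: t).getLast hne with hb
    set m := (x :: t).dropLast with hm
    have hsplit : x :: t = m ++ [b] := (List.dropLast_append_getLast hne).symm
    have hlen : m.length = t.length := by simp [hm]
    have hlast2 : (x :: t).getLast? = some b := by
      rw [hsplit]; simp
    have hlast : (a :: x :: t).getLast? = some b := by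
      rw [List.getLast?_cons, hlast2]; simp
    rw [aSymLoopA, aSymCheck, PySem.List.pyGet?_zero_cons, PySem.List.pyGet?_neg_one,
      hlast, hlast2]
    by_cases hab : a = b
    · subst hab
      simp only [ne_eq, not_true_eq_false, if_false]
      rw [hsplit]
      have h0 : aSymLoopA (b :: (m ++ [b])) (m ++ [b]) (0 + 1) (-1 - 1) =
          aSymLoopA (b :: (m ++ [b])) (m ++ [b]) (((0 : Nat) : Int) + 1) (-(((0 : Nat) : Int) + 2)) := by
        norm_num
      rw [h0, loopA_inner b m m 0 (by omega) (by simp)]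
      have h1 : aSymLoopA m m (((0 : Nat) : Int)) (-(((0 : Nat) : Int) + 1)) =
          aSymLoopA m m 0 (-1) := by norm_num
      rw [h1, show (m ++ [b]).dropLast = m from by simp]
      exact key m
    · simp [hab, Ne.symm hab]
termination_by ws => ws.length
decreasing_by simp

-- ===== VERDICT (by name: the statement is the Claim_ definition above) =====
theorem aSym_spec : Claim_equal_aSym := by
  intro s _
  unfold Spec_aSym aSym aSym_alt
  exact key _
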